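-- pv_equiv track=rewrite | github.com/CallumC28/Password-Strength-Tester | password.py | suggest_extra_tips
-- ===== SOURCE A (Python) =====
-- def suggest_extra_tips(pw: str) -> list[str]:
--     suggestions = []
--
--     if len(pw) < 12:
--         suggestions.append("Use at least 12 characters.")
--     if pw.lower() == pw or pw.upper() == pw:
--         suggestions.append("Mix uppercase and lowercase letters.")
--     if not any(c.isdigit() for c in pw):
--         suggestions.append("Add some numbers (e.g., 3, 7, 9).")
--     if not any(c in "!@#$%^&*()_+-=[]{}|;:',.<>/?`~" for c in pw):
--         suggestions.append("Include special symbols (!@#$, etc.).")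
--     if any(pw.count(c) > len(pw) / 2 for c in set(pw)):
--         suggestions.append("Avoid repeating the same character too often.")
--     if pw.lower() in ["password", "123456", "qwerty", "admin"]:
--         suggestions.append("Avoid common passwords like 'password' or '123456'.")
--
--     return suggestions
-- ===== SOURCE B (Python) =====
-- def suggest_extra_tips(pw: str) -> list[str]:
--     # Boyer-Moore majority vote: the only character that can occur in more than
--     # half of pw is the surviving candidate, verified with one count.
--     cand, votes = None, 0
--     for c in pw:
--         if votes == 0:
--             cand, votes = c, 1
--         elif c == cand:
--             votes += 1
--         else:
--             votes -= 1
--     dominant = cand is not None and 2 * pw.count(cand) > len(pw)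
--     chars = set(pw)
--     rules = [
--         (len(pw) < 12, "Use at least 12 characters."),
--         (pw.lower() == pw or pw.upper() == pw, "Mix uppercase and lowercase letters."),
--         (not (chars & set("0123456789")), "Add some numbers (e.g., 3, 7, 9)."),
--         (not (chars & set("!@#$%^&*()_+-=[]{}|;:',.<>/?`~")), "Include special symbols (!@#$, etc.)."),
--         (dominant, "Avoid repeating the same character too often."),
--         (pw.lower() in ("password", "123456", "qwerty", "admin"), "Avoid common passwords like 'password' or '123456'."),
--     ]
--     return [msg for hit, msg in rules if hit]
-- ===== Notes on version B (the rewrite author's own statement) =====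
-- stated objective: faster
-- what changed: B replaces A's repeat check (any(pw.count(c) > len/2) over set(pw), a rescan per distinct character) with Boyer-Moore majority vote plus one verification count, replaces the digit/special any()-scans with set intersections, and emits the messages from a declarative (condition, message) table instead of six sequential if/append blocks.
import Mathlib
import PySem

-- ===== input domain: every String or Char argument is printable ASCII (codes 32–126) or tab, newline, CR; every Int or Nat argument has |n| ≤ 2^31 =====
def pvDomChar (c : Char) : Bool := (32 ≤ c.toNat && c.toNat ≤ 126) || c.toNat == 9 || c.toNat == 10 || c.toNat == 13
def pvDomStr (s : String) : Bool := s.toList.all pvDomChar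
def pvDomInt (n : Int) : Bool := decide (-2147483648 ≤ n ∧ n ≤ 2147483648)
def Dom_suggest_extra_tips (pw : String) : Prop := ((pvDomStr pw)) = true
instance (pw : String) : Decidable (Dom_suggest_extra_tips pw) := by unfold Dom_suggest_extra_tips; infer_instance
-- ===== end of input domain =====

-- B replaces A's count-over-set repeat check by Boyer-Moore majority vote, the any() scans by
-- set intersections, and the six if/append blocks by a (condition, message) table.

-- ===== PORT A =====
-- 'c in "!@#...~"' for a single character c = membership in the list of its characters (exact for 1-char needles)
def pvSpecialsA : List Char := "!@#$%^&*()_+-=[]{}|;:',.<>/?`~".toList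

-- 'pw.count(c) > len(pw) / 2' : both sides small ints, Python's float '/' is exact here, so it is 2*count > len
def suggest_extra_tips (pw : String) : List String :=
  let xs := pw.toList
  (if xs.length < 12 then ["Use at least 12 characters."] else []) ++
  (if PySem.Str.lower pw == pw || PySem.Str.upper pw == pw then ["Mix uppercase and lowercase letters."] else []) ++
  (if !(xs.any PySem.Chars.isdigit) then ["Add some numbers (e.g., 3, 7, 9)."] else []) ++
  (if !(xs.any (fun c => pvSpecialsA.contains c)) then ["Include special symbols (!@#$, etc.)."] else []) ++
  (if (PySem.Set.ofList xs).any (fun c => decide (2 * xs.count c > xs.length)) then ["Avoid repeating the same character too often."] else []) ++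
  (if ["password", "123456", "qwerty", "admin"].contains (PySem.Str.lower pw) then ["Avoid common passwords like 'password' or '123456'."] else [])

-- ===== PORT B =====
-- Boyer-Moore vote step: if votes == 0: cand, votes = c, 1; elif c == cand: votes += 1; else: votes -= 1
def pvBmStep (st : Option Char × Int) (c : Char) : Option Char × Int :=
  if st.2 == 0 then (some c, 1)
  else if some c == st.1 then (st.1, st.2 + 1)
  else (st.1, st.2 - 1)

-- 'cand is not None and 2 * pw.count(cand) > len(pw)'; a single-character needle's substring count = the character count (exact)
def pvVerify (xs : List Char) (cand : Option Char) : Bool :=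
  match cand with
  | some c => decide (2 * xs.count c > xs.length)
  | none => false

def suggest_extra_tips_alt (pw : String) : List String :=
  let xs := pw.toList
  let st := xs.foldl pvBmStep (none, 0)
  let dominant := pvVerify xs st.1
  let chars := PySem.Set.ofList xs
  let rules : List (Bool × String) := [
    (decide (xs.length < 12), "Use at least 12 characters."),
    (PySem.Str.lower pw == pw || PySem.Str.upper pw == pw, "Mix uppercase and lowercase letters."),
    ((PySem.Set.inter chars (PySem.Set.ofList "0123456789".toList)).isEmpty, "Add some numbers (e.g., 3, 7, 9)."),
    ((PySem.Set.inter chars (PySem.Set.ofList "!@#$%^&*()_+-=[]{}|;:',.<>/?`~".toList)).isEmpty, "Include special symbols (!@#$, etc.)."),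
    (dominant, "Avoid repeating the same character too often."),
    (["password", "123456", "qwerty", "admin"].contains (PySem.Str.lower pw), "Avoid common passwords like 'password' or '123456'.")
  ]
  rules.filterMap (fun r => if r.1 then some r.2 else none)

-- ===== PRECONDITION & SPEC =====
def Spec_suggest_extra_tips (pw : String) (out : List String) : Prop := out = suggest_extra_tips_alt pw
instance (pw : String) (out : List String) : Decidable (Spec_suggest_extra_tips pw out) := by unfold Spec_suggest_extra_tips; infer_instance

-- ===== CLAIM (what is proved, stated in full; the proofs are below) =====
def Claim_equal_suggest_extra_tips : Prop := ∀ (pw : String), Dom_suggest_extra_tips pw → Spec_suggest_extra_tips pw (suggest_extra_tips pw)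

-- ===== LEMMAS AND PROOFS =====

-- isdigit over ASCII is membership in "0123456789"
set_option maxRecDepth 10000 in
lemma isdigit_eq_mem (c : Char) : PySem.Chars.isdigit c = ("0123456789".toList.contains c) := by
  have h : ("0123456789".toList) = ['0', '1', '2', '3', '4', '5', '6', '7', '8', '9'] := by decide
  rw [h, Bool.eq_iff_iff]
  simp only [PySem.Chars.isdigit, List.contains_cons, List.contains, Bool.or_eq_true, beq_iff_eq,
    Bool.and_eq_true, decide_eq_true_eq, Char.le_def, Char.ext_iff, UInt32.le_iff_toNat_le, UInt32.ext_iff,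
    List.elem_nil]
  simp only [show '0'.val.toNat = 48 from rfl, show '1'.val.toNat = 49 from rfl,
    show '2'.val.toNat = 50 from rfl, show '3'.val.toNat = 51 from rfl,
    show '4'.val.toNat = 52 from rfl, show '5'.val.toNat = 53 from rfl,
    show '6'.val.toNat = 54 from rfl, show '7'.val.toNat = 55 from rfl,
    show '8'.val.toNat = 56 from rfl, show '9'.val.toNat = 57 from rfl]
  simp only [Bool.false_eq_true, or_false]
  omega

-- 'not (set(xs) & set(D))' is 'not any(c in D for c in xs)'
lemma inter_isEmpty_eq (xs D : List Char) :
    (PySem.Set.inter (PySem.Set.ofList xs) (PySem.Set.ofList D)).isEmpty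
      = !(xs.any (fun c => D.contains c)) := by
  rw [Bool.eq_iff_iff]
  simp [List.isEmpty_iff, List.eq_nil_iff_forall_not_mem, PySem.Set.mem_inter, PySem.Set.mem_ofList]

-- Boyer-Moore invariant over the vote fold

lemma bm_inv (xs : List Char) (k : Option Char) (v : Int) (f : Char → Int) (L : Int)
    (hv : 0 ≤ v)
    (hinv : ∀ x, 2 * f x ≤ L - v + (if k = some x then 2 * v else 0)) :
    0 ≤ (xs.foldl pvBmStep (k, v)).2 ∧
      ∀ x, 2 * (f x + (xs.count x : Int)) ≤ (L + xs.length) - (xs.foldl pvBmStep (k, v)).2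
        + (if (xs.foldl pvBmStep (k, v)).1 = some x then 2 * (xs.foldl pvBmStep (k, v)).2 else 0) := by
  induction xs generalizing k v f L with
  | nil =>
    refine ⟨hv, fun x => ?_⟩
    simpa using hinv x
  | cons c t ih =>
    simp only [List.foldl_cons]
    have hmain :
        0 ≤ (pvBmStep (k, v) c).2 ∧
        ∀ x, 2 * (f x + (if c = x then (1:Int) else 0)) ≤ (L + 1) - (pvBmStep (k, v) c).2
          + (if (pvBmStep (k, v) c).1 = some x then 2 * (pvBmStep (k, v) c).2 else 0) := by
      unfold pvBmStep
      by_cases h0 : v = 0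
      · subst h0
        simp only [beq_self_eq_true, if_true]
        refine ⟨by norm_num, fun x => ?_⟩
        have := hinv x
        have hL : 2 * f x ≤ L := by split_ifs at this <;> omega
        by_cases hcx : c = x
        · rw [if_pos hcx, if_pos (congrArg some hcx)]; omega
        · rw [if_neg hcx, if_neg (fun h => hcx (Option.some.inj h))]; omega
      · have hbeq : (v == 0) = false := by simp [h0]
        simp only [hbeq, Bool.false_eq_true, if_false]
        by_cases hck : some c = k
        · have hbeq2 : (some c == k) = true := by simp [hck]
          simp only [hbeq2, if_true]
          refine ⟨by omega, fun x => ?_⟩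
          have := hinv x
          by_cases hkx : k = some x
          · have hcx : c = x := by rw [hkx] at hck; exact Option.some.inj hck
            rw [if_pos hkx] at this; rw [if_pos hcx, if_pos hkx]; omega
          · have hcx : ¬ c = x := fun h => hkx (by rw [← hck, h])
            rw [if_neg hkx] at this; rw [if_neg hcx, if_neg hkx]; omega
        · have hbeq2 : (some c == k) = false := by simp [hck]
          simp only [hbeq2, Bool.false_eq_true, if_false]
          refine ⟨by omega, fun x => ?_⟩
          have := hinv x
          by_cases hkx : k = some x
          · have hcx : ¬ c = x := fun h => hck (by rw [hkx, h])
            rw [if_pos hkx] at this; rw [if_neg hcx, if_pos hkx]; omega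
          · rw [if_neg hkx] at this
            by_cases hcx : c = x
            · rw [if_pos hcx, if_neg hkx]; omega
            · rw [if_neg hcx, if_neg hkx]; omega
    obtain ⟨hv', hinv'⟩ := hmain
    obtain ⟨h1, h2⟩ := ih (pvBmStep (k, v) c).1 (pvBmStep (k, v) c).2
      (fun x => f x + (if c = x then (1:Int) else 0)) (L + 1) hv' (by simpa using hinv')
    refine ⟨by simpa using h1, fun x => ?_⟩
    have hx := h2 x
    simp only [Prod.mk.eta] at hx ⊢
    simp only [List.count_cons, List.length_cons]
    by_cases hcx : c = x
    · simp only [hcx] at hx ⊢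
      simp only [beq_self_eq_true, if_true]
      push_cast
      split_ifs at hx ⊢ <;> omega
    · have hxc : (c == x) = false := by
        simp only [beq_eq_false_iff_ne, ne_eq]
        exact hcx
      simp only [if_neg hcx] at hx
      simp only [hxc, Bool.false_eq_true, if_false]
      push_cast
      split_ifs at hx ⊢ <;> omega

lemma bm_cand (xs : List Char) (k : Option Char) (v : Int) :
    (xs.foldl pvBmStep (k, v)).1 = k ∨ ∃ c ∈ xs, (xs.foldl pvBmStep (k, v)).1 = some c := by
  induction xs generalizing k v with
  | nil => exact Or.inl rfl
  | cons c t ih =>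
    simp only [List.foldl_cons]
    have hst : (pvBmStep (k, v) c).1 = some c ∨ (pvBmStep (k, v) c).1 = k := by
      unfold pvBmStep; split_ifs <;> simp
    rcases ih (pvBmStep (k, v) c).1 (pvBmStep (k, v) c).2 with h | ⟨d, hd, h⟩
    · simp only [Prod.mk.eta] at h
      rcases hst with h2 | h2
      · exact Or.inr ⟨c, List.mem_cons_self .., by rw [h, h2]⟩
      · exact Or.inl (by rw [h, h2])
    · simp only [Prod.mk.eta] at h
      exact Or.inr ⟨d, List.mem_cons_of_mem _ hd, h⟩

lemma repeat_eq (xs : List Char) :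
    pvVerify xs (xs.foldl pvBmStep (none, 0)).1
      = (PySem.Set.ofList xs).any (fun c => decide (2 * xs.count c > xs.length)) := by
  unfold pvVerify
  obtain ⟨hv2, hbound⟩ := bm_inv xs none 0 (fun _ => 0) 0 le_rfl (by intro x; simp)
  rw [Bool.eq_iff_iff]
  constructor
  · intro h
    rcases hc : (xs.foldl pvBmStep (none, 0)).1 with _ | c
    · rw [hc] at h; simp at h
    · rw [hc] at h
      simp only [decide_eq_true_eq] at h
      have hmem : c ∈ xs := by
        rcases bm_cand xs none 0 with h2 | ⟨d, hd, h2⟩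
        · rw [h2] at hc; cases hc
        · rw [h2] at hc; rw [Option.some.inj hc] at hd; exact hd
      simp only [List.any_eq_true]
      exact ⟨c, (PySem.Set.mem_ofList xs c).2 hmem, by simpa using h⟩
  · intro h
    simp only [List.any_eq_true] at h
    obtain ⟨c, hcmem, hcnt⟩ := h
    simp only [decide_eq_true_eq] at hcnt
    have hcand : (xs.foldl pvBmStep (none, 0)).1 = some c := by
      by_contra hne
      have := hbound c
      rw [if_neg hne] at this
      simp only [zero_add] at this
      omega
    rw [hcand]
    simpa using hcnt

-- the six-entry table emitted by filterMap is the six appended singleton blocks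
lemma assemble (p1 : Prop) [Decidable p1] (b2 b3 b4 b5 b6 : Bool) (s1 s2 s3 s4 s5 s6 : String) :
    ([(decide p1, s1), (b2, s2), (b3, s3), (b4, s4), (b5, s5), (b6, s6)] : List (Bool × String)).filterMap
        (fun r => if r.1 then some r.2 else none)
      = (if p1 then [s1] else []) ++ (if b2 then [s2] else []) ++ (if b3 then [s3] else []) ++
        (if b4 then [s4] else []) ++ (if b5 then [s5] else []) ++ (if b6 then [s6] else []) := by
  by_cases h : p1 <;> cases b2 <;> cases b3 <;> cases b4 <;> cases b5 <;> cases b6 <;>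
    simp [h]

-- ===== VERDICT (by name: the statement is the Claim_ definition above) =====
theorem suggest_extra_tips_spec : Claim_equal_suggest_extra_tips := by
  intro pw _
  show suggest_extra_tips pw = suggest_extra_tips_alt pw
  unfold suggest_extra_tips suggest_extra_tips_alt
  simp only [assemble, repeat_eq, inter_isEmpty_eq]
  rw [PySem.List.any_congr_mem (g := fun c => ("0123456789".toList.contains c))
    (fun x _ => isdigit_eq_mem x)]
  rfl
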